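-- pv_equiv track=rewrite | github.com/jasongdove/advent-of-code | adventofcode/year2023/day12.py | bit_set_lists
-- ===== SOURCE A (Python) =====
-- def bit_set_lists(n: int) -> list[int]:
--     #if n not in self.sets:
--         set_lens = []
--         set_bits = 0
--         span = 0
--         while n:
--             if n & 1:
--                 set_bits += 1
--                 span += 1
--             else:
--                 if span > 0:
--                     set_lens.append(span)
--                 span = 0
--             n >>= 1
--         if span > 0:
--             set_lens.append(span)
--         set_lens.reverse()
--         return set_lens
-- ===== SOURCE B (Python) =====
-- def bit_set_lists(n: int) -> list[int]:
--     return [len(g) for g in bin(n)[2:].split('0') if g]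
-- ===== Notes on version B (the rewrite author's own statement) =====
-- stated objective: idiomatic
-- what changed: Replaces the per-bit while-loop with a running span counter and final reverse by formatting the number in binary (MSB-first) and taking the lengths of the maximal '1'-groups obtained by splitting on '0', so no counter state and no reversal are needed.
import Mathlib
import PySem

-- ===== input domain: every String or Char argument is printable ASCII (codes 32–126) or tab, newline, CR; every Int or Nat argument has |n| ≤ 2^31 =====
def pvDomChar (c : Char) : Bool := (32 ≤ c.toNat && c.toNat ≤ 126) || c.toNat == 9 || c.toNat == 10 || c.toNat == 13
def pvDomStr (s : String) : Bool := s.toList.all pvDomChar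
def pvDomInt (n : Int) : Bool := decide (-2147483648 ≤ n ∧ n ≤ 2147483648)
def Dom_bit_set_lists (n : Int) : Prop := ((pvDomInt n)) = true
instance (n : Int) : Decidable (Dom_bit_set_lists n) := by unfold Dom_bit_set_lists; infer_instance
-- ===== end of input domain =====

-- B replaces A's per-bit while-loop (span counter + final reverse) by splitting the MSB-first
-- binary string on '0' and taking the group lengths; Pre_ excludes n < 0, where A's loop never terminates.


-- ===== PORT A =====
-- the while-loop of A: state (set_lens, set_bits, span); n runs over Nat (Pre_ gives 0 ≤ n)
def bitLoopA (n : Nat) (set_lens : List Int) (set_bits span : Int) : List Int :=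
  if h : n ≠ 0 then
    if n &&& 1 = 1 then
      bitLoopA (n >>> 1) set_lens (set_bits + 1) (span + 1)
    else
      bitLoopA (n >>> 1) (if span > 0 then set_lens ++ [span] else set_lens) set_bits 0
  else
    (if span > 0 then set_lens ++ [span] else set_lens).reverse
decreasing_by
  all_goals simp [Nat.shiftRight_one]; exact Nat.div_lt_self (Nat.pos_of_ne_zero h) one_lt_two

def bit_set_lists (n : Int) : List Int := bitLoopA n.toNat [] 0 0

-- ===== PORT B =====
def bit_set_lists_alt (n : Int) : List Int :=
  ((PySem.Chars.splitOn (PySem.Chars.slice (PySem.Int.toBinChars0b n) (some 2) none) ['0']).filter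
    (fun g => !g.isEmpty)).map (fun g => (g.length : Int))

-- ===== PRECONDITION & SPEC =====
-- Pre_ excludes n < 0: there A's 'while n: … n >>= 1' never terminates (n stays negative), so A returns nothing.
def Pre_bit_set_lists (n : Int) : Prop := 0 ≤ n
instance (n : Int) : Decidable (Pre_bit_set_lists n) := by unfold Pre_bit_set_lists; infer_instance
def pvWitness_bit_set_lists : Int := (22)
def Spec_bit_set_lists (n : Int) (out : List Int) : Prop := out = bit_set_lists_alt n
instance (n : Int) (out : List Int) : Decidable (Spec_bit_set_lists n out) := by unfold Spec_bit_set_lists; infer_instance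

-- ===== CLAIM (what is proved, stated in full; the proofs are below) =====
def Claim_equal_bit_set_lists : Prop := ∀ (n : Int), Dom_bit_set_lists n → Pre_bit_set_lists n → Spec_bit_set_lists n (bit_set_lists n)

-- ===== LEMMAS AND PROOFS =====

-- bits of n, least significant first (no leading zeros at the tail; lsbBits 0 = [])
def lsbBits (n : Nat) : List Bool :=
  if h : n ≠ 0 then (n % 2 == 1) :: lsbBits (n / 2)
  else []
decreasing_by exact Nat.div_lt_self (Nat.pos_of_ne_zero h) one_lt_two

-- run lengths of maximal blocks of `true`, read left to right, with k trues already pending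
def runsAux : List Bool → Nat → List Int
  | [], k => if k > 0 then [(k : Int)] else []
  | true :: t, k => runsAux t (k + 1)
  | false :: t, k => (if k > 0 then [(k : Int)] else []) ++ runsAux t 0

def bitChar (b : Bool) : Char := if b then '1' else '0'

-- reference version of PySem.Chars.splitOn.go with sep = ['0']
def mySplit : List Char → List Char → List (List Char)
  | [], cur => [cur.reverse]
  | c :: rest, cur => if c = '0' then cur.reverse :: mySplit rest [] else mySplit rest (c :: cur)

theorem lsbBits_unfold (n : Nat) :
    lsbBits n = if n ≠ 0 then (n % 2 == 1) :: lsbBits (n / 2) else [] := by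
  rw [lsbBits]; by_cases h : n = 0 <;> simp [h]

theorem bitLoopA_eq (n : Nat) : ∀ (lens : List Int) (sb : Int) (k : Nat),
    bitLoopA n lens sb (k : Int) = (lens ++ runsAux (lsbBits n) k).reverse := by
  induction n using Nat.strong_induction_on with
  | h n ih =>
    intro lens sb k
    rw [bitLoopA, lsbBits_unfold]
    by_cases h : n = 0
    · subst h
      simp [runsAux]
      split_ifs with hk
      · have : (0 : Int) < (k : Int) := by exact_mod_cast hk
        simp [this]
      · have : ¬ ((0 : Int) < (k : Int)) := by exact_mod_cast hk
        simp [this]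
    · have hlt : n / 2 < n := Nat.div_lt_self (Nat.pos_of_ne_zero h) one_lt_two
      simp only [h, if_pos, dif_pos, ne_eq, not_false_iff, if_true]
      rw [Nat.and_one_is_mod, Nat.shiftRight_one]
      by_cases hm : n % 2 = 1
      · have hb : (n % 2 == 1) = true := by simp [hm]
        have := ih (n / 2) hlt lens (sb + 1) (k + 1)
        simp only [hm, if_pos, hb]
        rw [show ((k : Int) + 1) = ((k + 1 : Nat) : Int) by push_cast; ring, this]
        simp [runsAux]
      · have hb : (n % 2 == 1) = false := by simp [hm]
        simp only [hm, if_neg, hb]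
        have h2 := ih (n / 2) hlt (if (k : Int) > 0 then lens ++ [(k : Int)] else lens) sb 0
        simp only [Nat.cast_zero] at h2
        rw [h2]
        simp only [runsAux]
        by_cases hk : k > 0
        · have : (0 : Int) < (k : Int) := by exact_mod_cast hk
          simp [hk, this]
        · have : ¬ ((0 : Int) < (k : Int)) := by
            simpa using (by exact_mod_cast hk : ¬ (0 : Int) < (k : Int))
          simp [hk, this]

theorem toDigitsCore_eq (fuel : Nat) : ∀ (n : Nat) (ds : List Char), 0 < n → n ≤ fuel →
    Nat.toDigitsCore 2 (fuel + 1) n ds = ((lsbBits n).reverse.map bitChar) ++ ds := by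
  induction fuel with
  | zero => intro n ds h1 h2; omega
  | succ fuel ih =>
    intro n ds h1 h2
    rw [Nat.toDigitsCore]
    have hn : n ≠ 0 := Nat.pos_iff_ne_zero.mp h1
    rw [lsbBits_unfold]; simp only [hn, ne_eq, not_false_iff, if_true]
    have hd : Nat.digitChar (n % 2) = bitChar (n % 2 == 1) := by
      rcases Nat.mod_two_eq_zero_or_one n with h | h <;> simp [h, Nat.digitChar, bitChar]
    by_cases h2z : n / 2 = 0
    · simp [h2z, hd, lsbBits_unfold]
    · have : n / 2 ≤ fuel := by
        have := Nat.div_lt_self h1 one_lt_two; omega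
      rw [if_neg h2z, ih (n / 2) _ (Nat.pos_of_ne_zero h2z) this]
      simp [hd]

theorem splitOn_go_eq (fuel : Nat) : ∀ (l cur : List Char) (acc : List (List Char)),
    l.length < fuel →
    PySem.Chars.splitOn.go ['0'] fuel l cur acc = acc.reverse ++ mySplit l cur := by
  induction fuel with
  | zero => intro l cur acc h; omega
  | succ fuel ih =>
    intro l cur acc h
    cases l with
    | nil =>
      rw [PySem.Chars.splitOn.go]
      simp [mySplit]
      omega
    | cons c rest =>
      rw [PySem.Chars.splitOn.go]
      simp only [List.isPrefixOf, Bool.and_true, beq_iff_eq, List.length_nil, List.length_cons,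
        List.drop_zero, List.drop]
      by_cases hc : c = '0'
      · subst hc
        rw [if_pos rfl]
        rw [ih rest [] (cur.reverse :: acc) (by simp at h; omega)]
        simp [mySplit]
      · rw [if_neg (fun hh => hc hh.symm)]
        rw [ih rest (c :: cur) acc (by simp at h; omega)]
        simp [mySplit, hc]

theorem mySplit_runs (bs : List Bool) : ∀ (k : Nat),
    ((mySplit (bs.map bitChar) (List.replicate k '1')).filter (fun g => !g.isEmpty)).map
      (fun g => (g.length : Int)) = runsAux bs k := by
  induction bs with
  | nil =>
    intro k
    cases k with
    | zero => simp [mySplit, runsAux]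
    | succ k => simp [mySplit, runsAux, List.filter]
  | cons b t ih =>
    intro k
    cases b with
    | true =>
      simp only [List.map_cons]
      rw [show bitChar true = '1' from rfl, mySplit, if_neg (by decide)]
      rw [show ('1' :: List.replicate k '1') = List.replicate (k + 1) '1' from by
        simp [List.replicate_succ]]
      rw [ih (k + 1)]; rfl
    | false =>
      simp only [List.map_cons]
      rw [show bitChar false = '0' from rfl, mySplit, if_pos rfl]
      cases k with
      | zero => simpa [runsAux, List.filter] using ih 0
      | succ k =>
        have h1 : (!(List.replicate (k+1) '1').reverse.isEmpty) = true := by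
          simp [List.isEmpty_iff]
        have ih0 := ih 0
        simp only [List.replicate_zero] at ih0
        rw [List.filter_cons, if_pos h1, List.map_cons, ih0]
        simp [runsAux]

theorem runsAux_replicate (s : Nat) : ∀ k, runsAux (List.replicate s true) k =
    if s + k > 0 then [((s + k : Nat) : Int)] else [] := by
  induction s with
  | zero => intro k; simp [runsAux]
  | succ s ih =>
    intro k
    rw [List.replicate_succ]
    simp only [runsAux]
    rw [ih (k + 1)]
    have h1 : s + (k + 1) > 0 := by omega
    have h2 : s + 1 + k > 0 := by omega
    simp only [h1, h2, if_pos]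
    congr 1; omega

theorem runsAux_append_false (x : List Bool) : ∀ (y : List Bool) (k : Nat),
    runsAux (x ++ false :: y) k = runsAux x k ++ runsAux y 0 := by
  induction x with
  | nil => intro y k; simp [runsAux]
  | cons b t ih =>
    intro y k
    cases b with
    | true => simpa [runsAux] using ih y (k + 1)
    | false => simp [runsAux, ih y 0]

theorem runsAux_reverse (l : List Bool) : ∀ (s : Nat),
    runsAux (l.reverse ++ List.replicate s true) 0 = (runsAux l s).reverse := by
  induction l with
  | nil => intro s; simp [runsAux_replicate, runsAux]; split_ifs <;> simp
  | cons b t ih =>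
    intro s
    cases b with
    | true =>
      simp only [List.reverse_cons, List.append_assoc, List.singleton_append]
      rw [show (true :: List.replicate s true) = List.replicate (s + 1) true from by
        simp [List.replicate_succ], ih (s + 1)]
      rfl
    | false =>
      simp only [List.reverse_cons, List.append_assoc, List.singleton_append]
      rw [runsAux_append_false, runsAux_replicate]
      have ih0 := ih 0
      simp only [List.replicate_zero, List.append_nil] at ih0
      rw [ih0]
      simp only [runsAux, List.reverse_append]
      congr 1
      split_ifs with h1 h2 h2 <;> simp <;> omega

theorem toBin_slice_eq (m : Nat) (hm : m ≠ 0) :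
    PySem.Chars.slice (PySem.Int.toBinChars0b (m : Int)) (some 2) none =
      (lsbBits m).reverse.map bitChar := by
  have hneg : ¬ ((m : Int) < 0) := by omega
  rw [PySem.Int.toBinChars0b, if_neg hneg]
  simp only [Int.toNat_natCast]
  have h1 : 0 < m := Nat.pos_of_ne_zero hm
  rw [Nat.toDigits, toDigitsCore_eq m m [] h1 le_rfl]
  rw [PySem.Chars.slice_eq_listSlice, PySem.List.slice_from] <;> simp

-- ===== VERDICT (by name: the statement is the Claim_ definition above) =====
theorem bit_set_lists_spec : Claim_equal_bit_set_lists := by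
  intro n _ hpre
  have hpre' : 0 ≤ n := hpre
  obtain ⟨m, rfl⟩ : ∃ m : Nat, n = (m : Int) := ⟨n.toNat, by omega⟩
  unfold Spec_bit_set_lists bit_set_lists bit_set_lists_alt
  simp only [Int.toNat_natCast]
  by_cases h0 : m = 0
  · subst h0
    rw [show bitLoopA 0 [] 0 0 = [] from by rw [bitLoopA]; simp]
    decide
  · rw [toBin_slice_eq m h0]
    rw [PySem.Chars.splitOn, splitOn_go_eq _ _ _ _ (by omega)]
    simp only [List.reverse_nil, List.nil_append]
    have hms := mySplit_runs ((lsbBits m).reverse) 0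
    simp only [List.replicate_zero] at hms
    rw [hms]
    have hA := bitLoopA_eq m [] 0 0
    simp only [Nat.cast_zero, List.nil_append] at hA
    rw [hA]
    have := runsAux_reverse (lsbBits m) 0
    simpa using this.symm
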